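-- pv_equiv track=rewrite | github.com/D-N-Agrawal/WORKS | Packman_Game/packman.py | graph_matrix
-- ===== SOURCE A (Python) =====
-- rows = 20        # number of rows
--
-- def graph_matrix(nodes):
--     wtmg = {}
--     for i in nodes:
--         l = []
--         for j in nodes:
--             if (j == i+1) or (j == i-1) or (j == i-rows) or (j == i+rows):
--                 l = l + [(j,1)]
--             elif(j == i):
--                 l = l + [(j,0)]
--             else:
--                 l = l + [(j,-1)]
--
--         wtmg[i] = l
--
--     return wtmg
-- ===== SOURCE B (Python) =====
-- rows = 20        # number of rows
--
-- def graph_matrix(nodes):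
--     # index table: value -> all positions where it occurs in nodes
--     pos = {}
--     for k, v in enumerate(nodes):
--         pos.setdefault(v, []).append(k)
--     wtmg = {}
--     for i in nodes:
--         if i in wtmg:
--             continue
--         row = [(j, -1) for j in nodes]
--         for v in (i + 1, i - 1, i - rows, i + rows):
--             for p in pos.get(v, ()):
--                 row[p] = (v, 1)
--         for p in pos[i]:
--             row[p] = (i, 0)
--         wtmg[i] = row
--     return wtmg
-- ===== Notes on version B (the rewrite author's own statement) =====
-- stated objective: faster
-- what changed: Instead of classifying every (i, j) pair and growing each row by repeated list concatenation, B builds a value-to-positions index once, then creates each row as a default template and patches only the positions of the four neighbour values and of the key itself.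
import Mathlib
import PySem

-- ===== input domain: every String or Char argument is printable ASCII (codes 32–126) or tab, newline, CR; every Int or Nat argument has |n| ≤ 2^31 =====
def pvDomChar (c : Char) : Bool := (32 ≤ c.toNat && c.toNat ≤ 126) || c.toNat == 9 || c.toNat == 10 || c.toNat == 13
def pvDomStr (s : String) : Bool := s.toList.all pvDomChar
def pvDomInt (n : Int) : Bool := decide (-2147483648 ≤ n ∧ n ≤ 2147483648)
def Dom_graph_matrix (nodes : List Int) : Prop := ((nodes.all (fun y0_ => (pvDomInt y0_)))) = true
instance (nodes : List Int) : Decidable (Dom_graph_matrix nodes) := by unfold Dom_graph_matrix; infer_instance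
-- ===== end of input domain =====

-- B replaces A's per-pair classification of all n^2 (i, j) pairs by a positions index:
-- one default template row per key, patched only at the positions of the four neighbour
-- values and of the key itself (objective: faster; A also rebuilds each row by repeated
-- list concatenation).


-- ===== PORT A =====
def graph_matrix (nodes : List Int) : List (Int × List (Int × Int)) :=
  (nodes.foldl (fun wtmg i =>
    wtmg.insert i (nodes.foldl (fun l j =>
      if j = i + 1 ∨ j = i - 1 ∨ j = i - 20 ∨ j = i + 20 then l ++ [(j, 1)]
      else if j = i then l ++ [(j, 0)]
      else l ++ [(j, -1)]) [])) (PySem.Dict.empty : PySem.Dict Int (List (Int × Int)))).items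

-- ===== PORT B =====
-- row[p] = val for each p in ps (Python: 'for p in ps: row[p] = val'; every p here is an
-- in-range nonnegative index produced by enumerate, so List.set is exact)
def pvPatchAll (row : List (Int × Int)) (ps : List Nat) (val : Int × Int) : List (Int × Int) :=
  ps.foldl (fun r p => r.set p val) row

def graph_matrix_alt (nodes : List Int) : List (Int × List (Int × Int)) :=
  let pos : PySem.Dict Int (List Nat) :=
    nodes.zipIdx.foldl (fun d p => d.modify p.1 [] (fun l => l ++ [p.2])) PySem.Dict.empty
  (nodes.foldl (fun wtmg i =>
    if wtmg.contains i then wtmg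
    else
      let row0 := nodes.map (fun j => (j, (-1 : Int)))
      let row1 := [i + 1, i - 1, i - 20, i + 20].foldl
        (fun r v => pvPatchAll r (pos.getD v []) (v, 1)) row0
      wtmg.insert i (pvPatchAll row1 (pos.getD i []) (i, 0)))
    (PySem.Dict.empty : PySem.Dict Int (List (Int × Int)))).items

-- ===== PRECONDITION & SPEC =====
def Spec_graph_matrix (nodes : List Int) (out : List (Int × List (Int × Int))) : Prop := out = graph_matrix_alt nodes
instance (nodes : List Int) (out : List (Int × List (Int × Int))) : Decidable (Spec_graph_matrix nodes out) := by unfold Spec_graph_matrix; infer_instance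

-- ===== CLAIM (what is proved, stated in full; the proofs are below) =====
def Claim_equal_graph_matrix : Prop := ∀ (nodes : List Int), Dom_graph_matrix nodes → Spec_graph_matrix nodes (graph_matrix nodes)

-- ===== LEMMAS AND PROOFS =====

-- the row value both programs compute for key i
def pvRow (nodes : List Int) (i : Int) : List (Int × Int) :=
  nodes.map (fun j => (j, if j = i + 1 ∨ j = i - 1 ∨ j = i - 20 ∨ j = i + 20 then 1 else if j = i then 0 else -1))

theorem pvRowA (nodes : List Int) (i : Int) :
    nodes.foldl (fun l j =>
      if j = i + 1 ∨ j = i - 1 ∨ j = i - 20 ∨ j = i + 20 then l ++ [(j, 1)]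
      else if j = i then l ++ [(j, 0)]
      else l ++ [(j, -1)]) [] = pvRow nodes i := by
  have h : (fun (l : List (Int × Int)) j =>
      if j = i + 1 ∨ j = i - 1 ∨ j = i - 20 ∨ j = i + 20 then l ++ [(j, (1 : Int))]
      else if j = i then l ++ [(j, 0)]
      else l ++ [(j, -1)]) = (fun l j => l ++ [(j, if j = i + 1 ∨ j = i - 1 ∨ j = i - 20 ∨ j = i + 20 then (1 : Int) else if j = i then 0 else -1)]) := by
    funext l j; split_ifs <;> rfl
  rw [h, PySem.List.foldl_append_singleton_eq_map]; rfl

theorem pvPatchAll_length (row : List (Int × Int)) (ps : List Nat) (val : Int × Int) :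
    (pvPatchAll row ps val).length = row.length := by
  induction ps generalizing row with
  | nil => rfl
  | cons q ps ih => simp [pvPatchAll, List.foldl_cons] at ih ⊢; rw [ih, List.length_set]

theorem pvPatchAll_getElem (row : List (Int × Int)) (ps : List Nat) (val : Int × Int)
    (p : Nat) (hp : p < row.length) :
    (pvPatchAll row ps val)[p]'(by rw [pvPatchAll_length]; exact hp) =
      if p ∈ ps then val else row[p] := by
  induction ps generalizing row with
  | nil => simp [pvPatchAll]
  | cons q ps ih =>
    simp only [pvPatchAll, List.foldl_cons] at ih ⊢
    rw [ih (row.set q val) ((List.length_set ..).symm ▸ hp)]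
    by_cases hmem : p ∈ ps
    · simp [hmem]
    · by_cases hpq : p = q
      · subst hpq; simp [hmem]
      · simp [hmem, List.getElem_set]; split_ifs <;> first | rfl | omega

theorem pvPos_getD (nodes : List Int) (v : Int) :
    (nodes.zipIdx.foldl (fun d p => d.modify p.1 [] (fun l => l ++ [p.2]))
      (PySem.Dict.empty : PySem.Dict Int (List Nat))).getD v [] =
      (nodes.zipIdx.filter (fun p => p.1 == v)).map (·.2) := by
  rw [PySem.Dict.getD_foldl_modify_append]; simp

theorem pvMemAux (nodes : List Int) (v : Int) (p : Nat) (hp : p < nodes.length) :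
    (p ∈ (nodes.zipIdx.filter (fun q => q.1 == v)).map (·.2)) ↔ nodes[p] = v := by
  simp only [List.mem_map, List.mem_filter, beq_iff_eq]
  constructor
  · rintro ⟨⟨a, q⟩, ⟨h1, h2⟩, rfl⟩
    rw [List.mk_mem_zipIdx_iff_getElem?] at h1
    simp only at h2; subst h2
    rw [List.getElem?_eq_getElem hp] at h1
    exact Option.some.inj h1
  · intro h
    exact ⟨(v, p), ⟨List.mk_mem_zipIdx_iff_getElem?.mpr (by simp [List.getElem?_eq_getElem hp, h]), rfl⟩, rfl⟩

theorem pvRowB (nodes : List Int) (i : Int) :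
    pvPatchAll
      ([i + 1, i - 1, i - 20, i + 20].foldl
        (fun r v => pvPatchAll r
          ((nodes.zipIdx.foldl (fun d p => d.modify p.1 [] (fun l => l ++ [p.2]))
            (PySem.Dict.empty : PySem.Dict Int (List Nat))).getD v []) (v, 1))
        (nodes.map (fun j => (j, (-1 : Int)))))
      ((nodes.zipIdx.foldl (fun d p => d.modify p.1 [] (fun l => l ++ [p.2]))
        (PySem.Dict.empty : PySem.Dict Int (List Nat))).getD i []) (i, 0) = pvRow nodes i := by
  simp only [List.foldl_cons, List.foldl_nil, pvPos_getD]
  apply List.ext_getElem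
  · simp [pvPatchAll_length, pvRow]
  · intro p h1 h2
    have hp : p < nodes.length := by simpa [pvRow] using h2
    simp [pvPatchAll_getElem, pvPatchAll_length, pvMemAux _ _ _ hp, pvRow, hp]
    split_ifs <;> simp_all [Prod.ext_iff] <;> omega

theorem pvInsertSame (d : PySem.Dict Int (List (Int × Int))) (i : Int) (v : List (Int × Int))
    (hnd : d.keys.Nodup) (hv : d.get? i = some v) : d.insert i v = d := by
  apply PySem.Dict.ext
  rw [PySem.Dict.items_insert_of_contains]
  · apply List.map_congr_left ?_ |>.trans (List.map_id _)
    intro p hpmem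
    by_cases hk : p.1 = i
    · have : d.get? p.1 = some p.2 := PySem.Dict.get?_of_mem_items d (show (p.1, p.2) ∈ d.items by simpa using hpmem) hnd
      rw [hk] at this; rw [hv] at this
      simp [hk, Option.some.inj this]
      rw [← hk]
    · simp [hk]
  · rw [PySem.Dict.contains_eq_isSome_get?, hv]; rfl

theorem pvDictFold (f : Int → List (Int × Int)) (nodes : List Int) :
    ∀ (d : PySem.Dict Int (List (Int × Int))), d.keys.Nodup →
      (∀ k v, d.get? k = some v → v = f k) →
      nodes.foldl (fun w i => w.insert i (f i)) d =
      nodes.foldl (fun w i => if w.contains i then w else w.insert i (f i)) d := by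
  induction nodes with
  | nil => intro d _ _; rfl
  | cons i nodes ih =>
    intro d hnd hval
    simp only [List.foldl_cons]
    by_cases hc : d.contains i
    · rw [if_pos hc]
      obtain ⟨v, hv⟩ : ∃ v, d.get? i = some v := by
        rw [PySem.Dict.contains_eq_isSome_get?] at hc
        exact Option.isSome_iff_exists.mp hc
      rw [hval i v hv] at hv
      rw [pvInsertSame d i (f i) hnd hv]
      exact ih d hnd hval
    · rw [if_neg hc]
      refine ih _ (PySem.Dict.nodup_keys_insert d i (f i) hnd) ?_
      intro k v hk
      rw [PySem.Dict.get?_insert] at hk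
      split_ifs at hk with h
      · subst h; exact (Option.some.inj hk).symm
      · exact hval k v hk

-- ===== VERDICT (by name: the statement is the Claim_ definition above) =====
theorem graph_matrix_spec : Claim_equal_graph_matrix := by
  intro nodes _
  unfold Spec_graph_matrix graph_matrix graph_matrix_alt
  simp only [pvRowA, pvRowB]
  rw [pvDictFold (pvRow nodes) nodes PySem.Dict.empty (by simp) (by simp [PySem.Dict.get?_empty])]
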